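-- pv_equiv track=rewrite | github.com/jd509/Hyperparameter-Optimization-for-Random-Forest-Classifier-using-Design-of-Experiments | rf_classifier.py | keep_dict
-- ===== SOURCE A (Python) =====
-- def keep_dict(Y_codes, Y_unique):
--     dict = {}
--     j = 0
--     for i in range(len(Y_codes)):
--         if Y_codes[i] in dict:
--             continue
--         else:
--             dict[Y_codes[i]] = Y_unique[j]
--             j += 1
--     return dict
-- ===== SOURCE B (Python) =====
-- def keep_dict(Y_codes, Y_unique):
--     # reverse pass with plain overwriting assignment: each code ends mapped to its
--     # FIRST index; sorting those indices recovers first-seen order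
--     first = {}
--     for i, c in reversed(list(enumerate(Y_codes))):
--         first[c] = i
--     firsts = sorted(first.values())
--     out = {}
--     for j, i in enumerate(firsts):
--         out[Y_codes[i]] = Y_unique[j]
--     return out
-- ===== Notes on version B (the rewrite author's own statement) =====
-- stated objective: alternative
-- what changed: Replaces A's forward pass with a membership test, continue branch and running j counter by a different algorithm: a reverse pass of plain overwriting assignments leaves each code mapped to its first-occurrence index, and sorting those indices recovers first-seen order before pairing with Y_unique.
-- outside the precondition, e.g. on keep_dict([1, 2, 3], ['a', 'b']): A raises IndexError, B raises IndexError
import Mathlib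
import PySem

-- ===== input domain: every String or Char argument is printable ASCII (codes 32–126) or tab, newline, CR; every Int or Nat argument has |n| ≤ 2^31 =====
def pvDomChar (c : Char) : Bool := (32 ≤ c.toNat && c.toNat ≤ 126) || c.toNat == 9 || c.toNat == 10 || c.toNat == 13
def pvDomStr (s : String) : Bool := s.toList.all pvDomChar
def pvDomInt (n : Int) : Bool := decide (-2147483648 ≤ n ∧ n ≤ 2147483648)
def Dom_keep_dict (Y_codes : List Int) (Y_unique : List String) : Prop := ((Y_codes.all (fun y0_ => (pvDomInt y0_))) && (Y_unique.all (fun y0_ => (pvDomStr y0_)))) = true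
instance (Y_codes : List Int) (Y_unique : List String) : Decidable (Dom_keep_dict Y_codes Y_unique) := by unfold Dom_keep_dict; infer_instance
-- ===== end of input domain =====

-- B replaces A's forward membership-checked loop by a different algorithm: a reverse pass of
-- plain overwriting assignments (each code ends mapped to its first index), then a sort of
-- those first-occurrence indices to recover first-seen order.

-- ===== PORT A =====
-- Loop over range(len(Y_codes)); dict membership check; Y_unique[j] via pyGetD ""
-- (in range on every input admitted by Pre_keep_dict, where Python A returns).
def keep_dict (Y_codes : List Int) (Y_unique : List String) : List (Int × String) :=
  ((PySem.List.pyRange 0 (PySem.List.len Y_codes) 1).foldl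
    (fun (st : PySem.Dict Int String × Int) i =>
      if st.1.contains (PySem.List.pyGetD Y_codes i 0) then st
      else (st.1.insert (PySem.List.pyGetD Y_codes i 0) (PySem.List.pyGetD Y_unique st.2 ""), st.2 + 1))
    (PySem.Dict.empty, 0)).1.items

-- ===== PORT B =====
-- Source B line by line: `for i, c in reversed(list(enumerate(Y_codes))): first[c] = i`,
-- `firsts = sorted(first.values())`, then the output loop over enumerate(firsts)
-- (Y_codes[i] / Y_unique[j] via pyGetD, in range on inputs admitted by Pre_keep_dict).
def keep_dict_alt (Y_codes : List Int) (Y_unique : List String) : List (Int × String) :=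
  let first := ((PySem.List.enumerate Y_codes 0).reverse).foldl
      (fun (d : PySem.Dict Int Int) ic => d.insert ic.2 ic.1) PySem.Dict.empty
  let firsts := PySem.List.sorted first.values (fun x => x) false
  ((PySem.List.enumerate firsts 0).foldl
      (fun (d : PySem.Dict Int String) ji =>
        d.insert (PySem.List.pyGetD Y_codes ji.2 0) (PySem.List.pyGetD Y_unique ji.1 ""))
      PySem.Dict.empty).items

-- ===== PRECONDITION & SPEC =====
-- Pre_ excludes exactly the inputs where Python A raises IndexError (more distinct
-- codes than entries of Y_unique); B raises IndexError there too.
def Pre_keep_dict (Y_codes : List Int) (Y_unique : List String) : Prop :=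
  (PySem.List.dedup Y_codes).length ≤ Y_unique.length
instance (Y_codes : List Int) (Y_unique : List String) : Decidable (Pre_keep_dict Y_codes Y_unique) := by unfold Pre_keep_dict; infer_instance

def pvWitness_keep_dict : List Int × List String := ([1, 1, 2], ["a", "b"])

def Spec_keep_dict (Y_codes : List Int) (Y_unique : List String) (out : List (Int × String)) : Prop := out = keep_dict_alt Y_codes Y_unique
instance (Y_codes : List Int) (Y_unique : List String) (out : List (Int × String)) : Decidable (Spec_keep_dict Y_codes Y_unique out) := by unfold Spec_keep_dict; infer_instance

-- ===== CLAIM (what is proved, stated in full; the proofs are below) =====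
def Claim_equal_keep_dict : Prop := ∀ (Y_codes : List Int) (Y_unique : List String), Dom_keep_dict Y_codes Y_unique → Pre_keep_dict Y_codes Y_unique → Spec_keep_dict Y_codes Y_unique (keep_dict Y_codes Y_unique)

-- ===== LEMMAS AND PROOFS =====

-- A's dictionary built from a seen-prefix s of distinct codes.
def dictB (u : List String) (s : List Int) : PySem.Dict Int String :=
  (PySem.List.enumerate s 0).foldl
    (fun (r : PySem.Dict Int String) jc => r.insert jc.2 (PySem.List.pyGetD u jc.1 "")) PySem.Dict.empty

lemma keys_dictB (u : List String) (s : List Int) :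
    (dictB u s).keys = PySem.Set.ofList s := by
  unfold dictB
  rw [PySem.Dict.keys_foldl_insert_key]
  simp [PySem.List.map_snd_enumerate, PySem.Set.update_nil_left]

lemma dictB_append (u : List String) (s : List Int) (c : Int) :
    dictB u (s ++ [c]) = (dictB u s).insert c (PySem.List.pyGetD u (s.length : Int) "") := by
  unfold dictB
  rw [PySem.List.enumerate_append, List.foldl_append]
  simp [PySem.List.enumerate_cons]

lemma loopA (u : List String) (l : List Int) (s : List Int) (hs : s.Nodup) :
    l.foldl
      (fun (st : PySem.Dict Int String × Int) c =>
        if st.1.contains c then st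
        else (st.1.insert c (PySem.List.pyGetD u st.2 ""), st.2 + 1))
      (dictB u s, (s.length : Int))
    = (dictB u (PySem.Set.update s l), ((PySem.Set.update s l).length : Int)) := by
  induction l generalizing s with
  | nil => simp [PySem.Set.update_nil]
  | cons c l ih =>
    have hcont : (dictB u s).contains c = decide (c ∈ s) := by
      rw [PySem.Dict.contains_eq_decide_mem_keys, keys_dictB]
      by_cases hc : c ∈ s <;> simp [PySem.Set.mem_ofList, hc]
    rw [List.foldl_cons]
    by_cases hc : c ∈ s
    · simp only [hcont, hc, decide_true, if_true]
      rw [ih s hs, PySem.Set.update_cons, PySem.Set.add_of_mem hc]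
    · simp only [hcont, hc, decide_false, Bool.false_eq_true, if_false]
      have hstep : ((dictB u s).insert c (PySem.List.pyGetD u (s.length : Int) ""),
          (s.length : Int) + 1) = (dictB u (s ++ [c]), (((s ++ [c]).length : Nat) : Int)) := by
        rw [dictB_append]
        simp
      rw [hstep, ih (s ++ [c]) (by simp [List.nodup_append, hs]; exact fun a ha h => hc (h ▸ ha)),
        PySem.Set.update_cons, PySem.Set.add_of_not_mem hc]

-- items of dictB over a duplicate-free list: the enumerate map, verbatim.
lemma items_dictB (u : List String) (s : List Int) (hs : s.Nodup) :
    (dictB u s).items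
      = (PySem.List.enumerate s 0).map (fun jc => (jc.2, PySem.List.pyGetD u jc.1 "")) := by
  unfold dictB
  rw [PySem.Dict.items_foldl_insert_fresh (PySem.List.enumerate s 0) (fun jc => jc.2)
      (fun jc => PySem.List.pyGetD u jc.1 "") PySem.Dict.empty
      (by intro a _; simp [PySem.Dict.contains_empty])
      (by rw [PySem.List.map_snd_enumerate]; exact hs)]
  simp [PySem.Dict.empty]

-- A's port computes exactly the enumerate map over the dedup of its codes.
lemma keep_dict_eq (Y_codes : List Int) (Y_unique : List String) :
    keep_dict Y_codes Y_unique
      = (PySem.List.enumerate (PySem.List.dedup Y_codes) 0).map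
          (fun jc => (jc.2, PySem.List.pyGetD Y_unique jc.1 "")) := by
  unfold keep_dict
  rw [PySem.List.foldl_pyRange_zero_pyGetD Y_codes 0
    (fun (st : PySem.Dict Int String × Int) c =>
      if st.1.contains c then st
      else (st.1.insert c (PySem.List.pyGetD Y_unique st.2 ""), st.2 + 1))
    (PySem.Dict.empty, 0)]
  have h0 : (dictB Y_unique [], ((([] : List Int).length : Nat) : Int))
      = (PySem.Dict.empty (κ := Int) (ν := String), (0 : Int)) := by
    simp [dictB, PySem.List.enumerate_nil]
  rw [← h0, loopA Y_unique Y_codes [] List.nodup_nil]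
  rw [items_dictB _ _ (by simp [PySem.Set.update_nil_left, PySem.Set.nodup_ofList])]
  simp [PySem.Set.update_nil_left]

-- first-occurrence index of x in codes (meaningful when x ∈ codes)
def fIdx : List Int → Int → Int
  | [], _ => 0
  | c :: cs, x => if x = c then 0 else fIdx cs x + 1

lemma fIdx_nonneg (codes : List Int) (x : Int) : 0 ≤ fIdx codes x := by
  induction codes with
  | nil => simp [fIdx]
  | cons c cs ih =>
    by_cases h : x = c
    · simp [fIdx, h]
    · simp [fIdx, h]
      omega

lemma pyGetD_fIdx (codes : List Int) (x : Int) (hx : x ∈ codes) :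
    PySem.List.pyGetD codes (fIdx codes x) 0 = x := by
  induction codes with
  | nil => cases hx
  | cons c cs ih =>
    by_cases h : x = c
    · rw [h]
      have h1 : fIdx (c :: cs) c = 0 := by simp [fIdx]
      rw [h1, PySem.List.pyGetD_of_nonneg _ _ le_rfl]
      simp
    · have hx' : x ∈ cs := by
        rcases List.mem_cons.mp hx with h' | h'
        · exact absurd h' h
        · exact h'
      have hnn := fIdx_nonneg cs x
      have h1 : fIdx (c :: cs) x = fIdx cs x + 1 := by simp [fIdx, h]
      rw [h1]
      rw [PySem.List.pyGetD_of_nonneg _ _ (by omega)]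
      have ht : (fIdx cs x + 1).toNat = (fIdx cs x).toNat + 1 := by omega
      rw [ht, List.getD_cons_succ]
      have := ih hx'
      rwa [PySem.List.pyGetD_of_nonneg _ _ hnn] at this

-- the reverse-pass dictionary of Source B, in foldr form
def rdict (codes : List Int) (off : Int) : PySem.Dict Int Int :=
  List.foldr (fun (ic : Int × Int) (d : PySem.Dict Int Int) => d.insert ic.2 ic.1)
    PySem.Dict.empty (PySem.List.enumerate codes off)

lemma rdict_get? (codes : List Int) (off : Int) (x : Int) :
    (rdict codes off).get? x = if x ∈ codes then some (off + fIdx codes x) else none := by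
  induction codes generalizing off with
  | nil => simp [rdict, PySem.List.enumerate_nil, PySem.Dict.get?_empty]
  | cons c cs ih =>
    show ((rdict cs (off + 1)).insert c off).get? x = _
    rw [PySem.Dict.get?_insert]
    by_cases h : x = c
    · simp [h, fIdx]
    · rw [if_neg h, ih (off + 1)]
      by_cases hx : x ∈ cs
      · have h1 : fIdx (c :: cs) x = fIdx cs x + 1 := by simp [fIdx, h]
        simp only [hx, if_true, List.mem_cons, h, false_or, h1]
        congr 1
        ring
      · simp [hx, h, List.mem_cons]

lemma rdict_mem_keys (codes : List Int) (x : Int) :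
    x ∈ (rdict codes 0).keys ↔ x ∈ codes := by
  constructor
  · intro h
    by_contra hx
    have := (PySem.Dict.get?_eq_none_iff_not_mem_keys (rdict codes 0) x).mp
      (by rw [rdict_get?]; simp [hx])
    exact this h
  · intro hx
    by_contra h
    have := (PySem.Dict.get?_eq_none_iff_not_mem_keys (rdict codes 0) x).mpr h
    rw [rdict_get?] at this
    simp [hx] at this

lemma rdict_nodup_keys (codes : List Int) (off : Int) : (rdict codes off).keys.Nodup := by
  induction codes generalizing off with
  | nil => simp [rdict, PySem.List.enumerate_nil, PySem.Dict.keys_empty]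
  | cons c cs ih =>
    exact PySem.Dict.nodup_keys_insert _ _ _ (ih (off + 1))

lemma rdict_keys_perm (codes : List Int) :
    (rdict codes 0).keys.Perm (PySem.List.dedup codes) := by
  rw [List.perm_ext_iff_of_nodup (rdict_nodup_keys codes 0)
    (by simp only [PySem.List.dedup_eq_ofList]; exact PySem.Set.nodup_ofList _)]
  intro a
  rw [rdict_mem_keys, PySem.List.mem_dedup]

lemma rdict_values_perm (codes : List Int) :
    (rdict codes 0).values.Perm ((PySem.List.dedup codes).map (fun x => fIdx codes x)) := by
  rw [PySem.Dict.values_eq_map_keys _ (rdict_nodup_keys codes 0) 0]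
  have hmap : (rdict codes 0).keys.map (fun k => (rdict codes 0).getD k 0)
      = (rdict codes 0).keys.map (fun x => fIdx codes x) := by
    apply List.map_congr_left
    intro k hk
    have hkc : k ∈ codes := (rdict_mem_keys codes k).mp hk
    rw [PySem.Dict.getD_eq_get?_getD, rdict_get?]
    simp [hkc]
  rw [hmap]
  exact List.Perm.map _ (rdict_keys_perm codes)

-- along first-seen order, first-occurrence indices strictly increase
lemma pw_fIdx (codes : List Int) :
    (PySem.List.dedup codes).Pairwise (fun a b => fIdx codes a < fIdx codes b) := by
  induction codes with
  | nil => simp [PySem.List.dedup_eq_ofList, PySem.Set.ofList_nil]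
  | cons c cs ih =>
    have hd : PySem.List.dedup (c :: cs)
        = c :: (PySem.List.dedup cs).filter (fun y => !(y == c)) := by
      simp only [PySem.List.dedup_eq_ofList, PySem.Set.ofList_cons, PySem.Set.discard]
    rw [hd]
    constructor
    · intro b hb
      have hbne : b ≠ c := by
        have := List.of_mem_filter hb
        simpa using this
      have := fIdx_nonneg cs b
      have h1 : fIdx (c :: cs) c = 0 := by simp [fIdx]
      have h2 : fIdx (c :: cs) b = fIdx cs b + 1 := by simp [fIdx, hbne]
      rw [h1, h2]
      omega
    · have hflt : ((PySem.List.dedup cs).filter (fun y => !(y == c))).Pairwise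
          (fun a b => fIdx cs a < fIdx cs b) := List.Pairwise.filter _ ih
      refine List.Pairwise.imp_of_mem ?_ hflt
      intro a b ha hb hab
      have hane : a ≠ c := by have := List.of_mem_filter ha; simpa using this
      have hbne : b ≠ c := by have := List.of_mem_filter hb; simpa using this
      have h1 : fIdx (c :: cs) a = fIdx cs a + 1 := by simp [fIdx, hane]
      have h2 : fIdx (c :: cs) b = fIdx cs b + 1 := by simp [fIdx, hbne]
      rw [h1, h2]
      omega

lemma enumerate_map (l : List Int) (g : Int → Int) (s : Int) :
    PySem.List.enumerate (l.map g) s = (PySem.List.enumerate l s).map (fun p => (p.1, g p.2)) := by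
  induction l generalizing s with
  | nil => simp [PySem.List.enumerate_nil]
  | cons a l ih => simp [PySem.List.enumerate_cons, ih]

-- B's port computes the same enumerate map.
lemma keep_dict_alt_eq (Y_codes : List Int) (Y_unique : List String) :
    keep_dict_alt Y_codes Y_unique
      = (PySem.List.enumerate (PySem.List.dedup Y_codes) 0).map
          (fun jc => (jc.2, PySem.List.pyGetD Y_unique jc.1 "")) := by
  unfold keep_dict_alt
  simp only [List.foldl_reverse]
  have hfirst : List.foldr
      (fun (x : Int × Int) (y : PySem.Dict Int Int) => y.insert x.2 x.1)
      PySem.Dict.empty (PySem.List.enumerate Y_codes 0) = rdict Y_codes 0 := rfl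
  rw [hfirst]
  have hfirsts : PySem.List.sorted (rdict Y_codes 0).values (fun x => x) false
      = (PySem.List.dedup Y_codes).map (fun x => fIdx Y_codes x) := by
    rw [PySem.List.sorted_eq_sorted_of_perm _ _ _ (fun a b h => h) (rdict_values_perm Y_codes)]
    exact PySem.List.sorted_eq_of_perm_of_pairwise_lt _ _ _ (List.Perm.refl _)
      ((List.pairwise_map).mpr (pw_fIdx Y_codes))
  rw [hfirsts]
  have hmem2 : ∀ p ∈ PySem.List.enumerate (PySem.List.dedup Y_codes) 0,
      p.2 ∈ Y_codes := by
    intro p hp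
    rcases (PySem.List.mem_enumerate_iff _ _ _).mp hp with ⟨k, hk, hpk⟩
    rw [hpk]
    exact (PySem.List.mem_dedup _ _).mp (List.getElem_mem hk)
  have hfold := PySem.Dict.items_foldl_insert_fresh
    (PySem.List.enumerate ((PySem.List.dedup Y_codes).map (fun x => fIdx Y_codes x)) 0)
    (fun ji : Int × Int => PySem.List.pyGetD Y_codes ji.2 0)
    (fun ji : Int × Int => PySem.List.pyGetD Y_unique ji.1 "")
    PySem.Dict.empty
    (by intro a _; simp [PySem.Dict.contains_empty])
    (by
      rw [enumerate_map, List.map_map]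
      have : List.map ((fun ji : Int × Int => PySem.List.pyGetD Y_codes ji.2 0) ∘
            (fun p : Int × Int => (p.1, fIdx Y_codes p.2)))
          (PySem.List.enumerate (PySem.List.dedup Y_codes) 0)
          = List.map (fun p : Int × Int => p.2)
            (PySem.List.enumerate (PySem.List.dedup Y_codes) 0) := by
        apply List.map_congr_left
        intro p hp
        exact pyGetD_fIdx Y_codes p.2 (hmem2 p hp)
      rw [this, PySem.List.map_snd_enumerate]
      simp only [PySem.List.dedup_eq_ofList]
      exact PySem.Set.nodup_ofList _)
  beta_reduce at hfold
  rw [hfold]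
  rw [enumerate_map, List.map_map]
  have : List.map ((fun ji : Int × Int =>
          (PySem.List.pyGetD Y_codes ji.2 0, PySem.List.pyGetD Y_unique ji.1 "")) ∘
        (fun p : Int × Int => (p.1, fIdx Y_codes p.2)))
      (PySem.List.enumerate (PySem.List.dedup Y_codes) 0)
      = List.map (fun jc : Int × Int => (jc.2, PySem.List.pyGetD Y_unique jc.1 ""))
        (PySem.List.enumerate (PySem.List.dedup Y_codes) 0) := by
    apply List.map_congr_left
    intro p hp
    simp only [Function.comp]
    rw [pyGetD_fIdx Y_codes p.2 (hmem2 p hp)]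
  rw [this]
  simp [PySem.Dict.empty]

-- ===== VERDICT (by name: the statement is the Claim_ definition above) =====
theorem keep_dict_spec : Claim_equal_keep_dict := by
  intro Y_codes Y_unique _ _
  unfold Spec_keep_dict
  rw [keep_dict_eq, keep_dict_alt_eq]
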